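-- pv_equiv track=rewrite | github.com/MilRoad/EKids-Program | Students_homework/Egor_Boltrushevich/Homework_3/task_3.py | modify_list
-- ===== SOURCE A (Python) =====
-- def modify_list(lst):
--     i = 0
--     while i < len(lst):
--         if lst[i] % 2 == 0:
--             lst[i] = lst[i] // 2
--             i += 1
--         else:
--             lst.pop(i)
--
--     return lst
--     pass
-- ===== SOURCE B (Python) =====
-- def modify_list(lst):
--     # Two staged passes: select the even elements, then halve them;
--     # lst[:] = ... rebinds the contents in place (same object, as A mutates).
--     evens = [x for x in lst if x % 2 == 0]
--     lst[:] = [x // 2 for x in evens]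
--     return lst
-- ===== Notes on version B (the rewrite author's own statement) =====
-- stated objective: faster
-- what changed: Replaces the while+pop quadratic in-place removal with two staged linear passes (a filter of the evens, then a map halving them) assigned back via lst[:].
import Mathlib
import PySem

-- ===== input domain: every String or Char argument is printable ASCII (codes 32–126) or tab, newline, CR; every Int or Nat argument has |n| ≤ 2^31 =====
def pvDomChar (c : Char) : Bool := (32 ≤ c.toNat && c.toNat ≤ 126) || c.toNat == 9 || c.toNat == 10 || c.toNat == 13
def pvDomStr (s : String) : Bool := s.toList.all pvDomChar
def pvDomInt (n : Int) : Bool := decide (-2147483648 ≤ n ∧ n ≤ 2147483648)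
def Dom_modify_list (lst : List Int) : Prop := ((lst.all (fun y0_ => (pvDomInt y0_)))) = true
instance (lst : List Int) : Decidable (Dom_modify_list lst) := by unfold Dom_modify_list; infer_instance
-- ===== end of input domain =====

-- B replaces A's quadratic while+pop removal with two staged linear passes (filter evens, then map halve, faster);
-- both Pythons mutate lst in place and return it: the equivalence proved here is about the return value.

-- ===== PORT A =====
-- A's while loop: the list at any moment is done ++ rest with i = done.length; on an even head
-- the halved element is appended to done, on an odd head the element is popped (dropped from rest).
def modifyListLoopA (done : List Int) (rest : List Int) : List Int :=
  match rest with
  | [] => done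
  | x :: xs =>
    if PySem.Int.mod x 2 = 0 then
      modifyListLoopA (done ++ [PySem.Int.floordiv x 2]) xs
    else
      modifyListLoopA done xs

def modify_list (lst : List Int) : List Int := modifyListLoopA [] lst

-- ===== PORT B =====
-- B's two staged comprehensions: filter the evens, then map the halving over them.
def modify_list_alt (lst : List Int) : List Int :=
  (lst.filter (fun x => PySem.Int.mod x 2 == 0)).map (fun x => PySem.Int.floordiv x 2)

-- ===== PRECONDITION & SPEC =====
def Spec_modify_list (lst : List Int) (out : List Int) : Prop := out = modify_list_alt lst
instance (lst : List Int) (out : List Int) : Decidable (Spec_modify_list lst out) := by unfold Spec_modify_list; infer_instance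

-- ===== CLAIM (what is proved, stated in full; the proofs are below) =====
def Claim_equal_modify_list : Prop := ∀ (lst : List Int), Dom_modify_list lst → Spec_modify_list lst (modify_list lst)

-- ===== LEMMAS AND PROOFS =====
theorem modifyListLoopA_eq (done rest : List Int) :
    modifyListLoopA done rest =
      done ++ (rest.filter (fun x => PySem.Int.mod x 2 == 0)).map (fun x => PySem.Int.floordiv x 2) := by
  induction rest generalizing done with
  | nil => simp [modifyListLoopA]
  | cons x xs ih =>
    by_cases h : PySem.Int.mod x 2 = 0
    · have hb : (PySem.Int.mod x 2 == 0) = true := beq_iff_eq.mpr h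
      rw [modifyListLoopA, if_pos h, ih]
      simp only [List.filter_cons, hb, if_true, List.map_cons, List.append_assoc,
        List.singleton_append]
    · have hb : (PySem.Int.mod x 2 == 0) = false := beq_eq_false_iff_ne.mpr h
      rw [modifyListLoopA, if_neg h, ih]
      simp only [List.filter_cons, hb, if_false, Bool.false_eq_true]

-- ===== VERDICT (by name: the statement is the Claim_ definition above) =====
theorem modify_list_spec : Claim_equal_modify_list := by
  intro lst _
  unfold Spec_modify_list modify_list modify_list_alt
  simpa using modifyListLoopA_eq [] lst
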